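-- pv_equiv track=rewrite | github.com/JangYeHoon/Algorithm | Implementation/python/05_TheCandyWar.py | teacher
-- ===== SOURCE A (Python) =====
-- def teacher(N, candy_list):
--     temp_list = [0 for i in range(N)]
--     for i in range(N):
--         if candy_list[i] % 2:
--             candy_list[i] += 1
--         candy_list[i] //= 2
--         temp_list[(i + 1) % N] += candy_list[i]
--
--     for i in range(N):
--         candy_list[i] += temp_list[i]
--     return candy_list
-- ===== SOURCE B (Python) =====
-- def teacher(N, candy_list):
--     # single streaming pass: carry the previous element's half in a scalar,
--     # seeding it with the last element's half for the circular wrap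
--     prev = (candy_list[N - 1] + 1) // 2 if N > 0 else 0
--     for i in range(N):
--         h = (candy_list[i] + 1) // 2
--         candy_list[i] = h + prev
--         prev = h
--     return candy_list
-- ===== Notes on version B (the rewrite author's own statement) =====
-- stated objective: simpler
-- what changed: A makes two passes with an N-slot temp accumulator (pushing each halved value into temp[(i+1)%N], then adding temp back); B is a single streaming pass that keeps only one scalar 'prev' (the previous element's half, seeded from the last element for the wrap) and writes h+prev directly, so the temp array, the second loop and the modular index arithmetic all disappear.
import Mathlib
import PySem

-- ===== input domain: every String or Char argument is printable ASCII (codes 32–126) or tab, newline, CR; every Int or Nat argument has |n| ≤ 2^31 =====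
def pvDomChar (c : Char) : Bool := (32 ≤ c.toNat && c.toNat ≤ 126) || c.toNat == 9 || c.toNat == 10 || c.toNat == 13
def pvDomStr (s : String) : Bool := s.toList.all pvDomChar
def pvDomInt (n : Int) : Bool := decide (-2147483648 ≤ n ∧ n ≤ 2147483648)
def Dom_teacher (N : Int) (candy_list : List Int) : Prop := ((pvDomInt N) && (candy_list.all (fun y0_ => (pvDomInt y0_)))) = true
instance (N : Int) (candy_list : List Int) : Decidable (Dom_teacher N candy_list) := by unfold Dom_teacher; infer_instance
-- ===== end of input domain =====

-- B replaces A's two passes with an N-slot temp accumulator by one streaming pass carrying a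
-- single scalar 'prev' (the previous element's half, seeded from the last element); same return
-- value everywhere A returns. Both Pythons mutate candy_list in place and return it; the
-- equivalence proved here is about the return value.

-- ===== PORT A =====
-- literal transliteration of Source A: temp_list of N zeros, a first index loop that
-- odd-adjusts, halves candy_list[i] in place and pushes the half into
-- temp_list[(i+1) % N], then a second index loop adding temp_list back in.
def teacher (N : Int) (candy_list : List Int) : List Int :=
  let temp0 : List Int := (PySem.List.pyRange 0 N 1).map (fun _ => (0 : Int))
  let st :=
    (PySem.List.pyRange 0 N 1).foldl
      (fun (s : List Int × List Int) i =>
        let c0 := PySem.List.pyGetD s.1 i 0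
        let c1 := if PySem.Int.mod c0 2 ≠ 0 then c0 + 1 else c0
        let c2 := PySem.Int.floordiv c1 2
        let cl' := PySem.List.pySetD s.1 i c2
        let j := PySem.Int.mod (i + 1) N
        let tl' := PySem.List.pySetD s.2 j (PySem.List.pyGetD s.2 j 0 + c2)
        (cl', tl'))
      (candy_list, temp0)
  (PySem.List.pyRange 0 N 1).foldl
    (fun cl i => PySem.List.pySetD cl i (PySem.List.pyGetD cl i 0 + PySem.List.pyGetD st.2 i 0))
    st.1

-- ===== PORT B =====
-- literal transliteration of Source B: prev seeded with the last element's half (guarded for N ≤ 0),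
-- then a single loop computing h = (c+1)//2, writing h + prev and carrying h as the new prev.
def teacher_alt (N : Int) (candy_list : List Int) : List Int :=
  let prev0 : Int :=
    if 0 < N then PySem.Int.floordiv (PySem.List.pyGetD candy_list (N - 1) 0 + 1) 2 else 0
  ((PySem.List.pyRange 0 N 1).foldl
      (fun (s : List Int × Int) i =>
        let h := PySem.Int.floordiv (PySem.List.pyGetD s.1 i 0 + 1) 2
        (PySem.List.pySetD s.1 i (h + s.2), h))
      (candy_list, prev0)).1

-- ===== PRECONDITION & SPEC =====
-- Pre_ excludes N > len(candy_list), where A raises IndexError (B raises there too).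
def Pre_teacher (N : Int) (candy_list : List Int) : Prop := N ≤ (candy_list.length : Int)
instance (N : Int) (candy_list : List Int) : Decidable (Pre_teacher N candy_list) := by
  unfold Pre_teacher; infer_instance

def pvWitness_teacher : Int × List Int := (3, [1, 2, 3])

def Spec_teacher (N : Int) (candy_list : List Int) (out : List Int) : Prop := out = teacher_alt N candy_list
instance (N : Int) (candy_list : List Int) (out : List Int) : Decidable (Spec_teacher N candy_list out) := by unfold Spec_teacher; infer_instance

-- ===== CLAIM (what is proved, stated in full; the proofs are below) =====
def Claim_equal_teacher : Prop := ∀ (N : Int) (candy_list : List Int), Dom_teacher N candy_list → Pre_teacher N candy_list → Spec_teacher N candy_list (teacher N candy_list)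

-- ===== LEMMAS AND PROOFS =====

-- (c+1)//2, the halved value both programs assign per position
def halveI (c : Int) : Int := PySem.Int.floordiv (c + 1) 2

-- A's first loop body, as a named function (definitionally the lambda inside teacher)
def stepA (n : Int) (s : List Int × List Int) (i : Int) : List Int × List Int :=
  let c0 := PySem.List.pyGetD s.1 i 0
  let c1 := if PySem.Int.mod c0 2 ≠ 0 then c0 + 1 else c0
  let c2 := PySem.Int.floordiv c1 2
  let cl' := PySem.List.pySetD s.1 i c2
  let j := PySem.Int.mod (i + 1) n
  let tl' := PySem.List.pySetD s.2 j (PySem.List.pyGetD s.2 j 0 + c2)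
  (cl', tl')

-- B's loop body, as a named function (definitionally the lambda inside teacher_alt)
def stepB (s : List Int × Int) (i : Int) : List Int × Int :=
  let h := PySem.Int.floordiv (PySem.List.pyGetD s.1 i 0 + 1) 2
  (PySem.List.pySetD s.1 i (h + s.2), h)

lemma teacher_eq (N : Int) (cl : List Int) :
    teacher N cl =
      (PySem.List.pyRange 0 N 1).foldl
        (fun c i => PySem.List.pySetD c i (PySem.List.pyGetD c i 0 +
          PySem.List.pyGetD ((PySem.List.pyRange 0 N 1).foldl (stepA N)
            (cl, (PySem.List.pyRange 0 N 1).map (fun _ => (0 : Int)))).2 i 0))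
        ((PySem.List.pyRange 0 N 1).foldl (stepA N)
            (cl, (PySem.List.pyRange 0 N 1).map (fun _ => (0 : Int)))).1 := rfl

lemma teacher_alt_eq (N : Int) (cl : List Int) :
    teacher_alt N cl =
      ((PySem.List.pyRange 0 N 1).foldl stepB
        (cl, if 0 < N then PySem.Int.floordiv (PySem.List.pyGetD cl (N - 1) 0 + 1) 2 else 0)).1 := rfl

-- odd-adjust-then-halve is (c+1)//2, evens included
lemma halve_adjust (c : Int) :
    PySem.Int.floordiv (if PySem.Int.mod c 2 ≠ 0 then c + 1 else c) 2 = halveI c := by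
  rw [PySem.Int.mod_eq_emod_of_pos (by norm_num)]
  unfold halveI
  rw [PySem.Int.floordiv_eq_ediv_of_pos (by norm_num), PySem.Int.floordiv_eq_ediv_of_pos (by norm_num)]
  split_ifs with h
  · rfl
  · omega

lemma mod_small (x b : Int) (hb : 0 < b) (h0 : 0 ≤ x) (h : x < b) : PySem.Int.mod x b = x := by
  rw [PySem.Int.mod_eq_emod_of_pos hb]; exact Int.emod_eq_of_lt h0 h

lemma mod_self' (b : Int) (hb : 0 < b) : PySem.Int.mod b b = 0 := by
  rw [PySem.Int.mod_eq_emod_of_pos hb]; exact Int.emod_self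

-- two lists of equal length with equal Python reads at every index are equal
lemma listExtPy (xs ys : List Int) (hlen : xs.length = ys.length)
    (h : ∀ j : Nat, j < xs.length → PySem.List.pyGetD xs (j:Int) 0 = PySem.List.pyGetD ys (j:Int) 0) :
    xs = ys := by
  apply List.ext_getElem hlen
  intro j h1 h2
  have := h j h1
  rw [PySem.List.pyGetD_natCast, PySem.List.pyGetD_natCast, List.getD_eq_getElem _ _ h1,
      List.getD_eq_getElem _ _ h2] at this
  exact this

-- invariant of A's first loop after m of n steps: positions < m are halved,
-- temp holds the halves shifted one to the right (index 0 filled only at m = n)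
lemma loopA_spec (cl : List Int) (n : Nat) (hn : 0 < n) (hnL : n ≤ cl.length) :
    ∀ m : Nat, m ≤ n →
    ((PySem.List.pyRange 0 (m:Int) 1).foldl (stepA (n:Int))
        (cl, (PySem.List.pyRange 0 (n:Int) 1).map (fun _ => (0 : Int)))).1.length = cl.length ∧
    ((PySem.List.pyRange 0 (m:Int) 1).foldl (stepA (n:Int))
        (cl, (PySem.List.pyRange 0 (n:Int) 1).map (fun _ => (0 : Int)))).2.length = n ∧
    (∀ j : Nat, j < cl.length →
      PySem.List.pyGetD ((PySem.List.pyRange 0 (m:Int) 1).foldl (stepA (n:Int))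
        (cl, (PySem.List.pyRange 0 (n:Int) 1).map (fun _ => (0 : Int)))).1 (j:Int) 0 =
        if j < m then halveI (cl.getD j 0) else cl.getD j 0) ∧
    (∀ j : Nat, j < n →
      PySem.List.pyGetD ((PySem.List.pyRange 0 (m:Int) 1).foldl (stepA (n:Int))
        (cl, (PySem.List.pyRange 0 (n:Int) 1).map (fun _ => (0 : Int)))).2 (j:Int) 0 =
        if 1 ≤ j ∧ j ≤ m then halveI (cl.getD (j-1) 0)
        else if j = 0 ∧ m = n then halveI (cl.getD (n-1) 0) else 0) := by
  intro m
  induction m with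
  | zero =>
    intro _
    rw [PySem.List.pyRange_one_eq_nil (b := ((0:Nat):Int)) (by norm_num)]
    simp only [List.foldl_nil]
    refine ⟨by simp, by simp [PySem.List.length_pyRange_one], ?_, ?_⟩
    · intro j hj; simp
    · intro j hj
      rw [PySem.List.pyGetD_map_pyRange (fun _ => (0:Int)) n j 0 hj]
      rw [if_neg (by omega), if_neg (by omega)]
  | succ m ih =>
    intro hm1
    have hm : m ≤ n := by omega
    have hmn : m < n := by omega
    have hmL : m < cl.length := by omega
    obtain ⟨hl1, hl2, hA, hT⟩ := ih hm
    have hcast : ((m+1 : Nat) : Int) = (m:Int) + 1 := by push_cast; ring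
    rw [hcast, PySem.List.pyRange_one_succ_right (by exact_mod_cast Nat.zero_le m),
        List.foldl_append, List.foldl_cons, List.foldl_nil]
    set r := (PySem.List.pyRange 0 (m:Int) 1).foldl (stepA (n:Int))
        (cl, (PySem.List.pyRange 0 (n:Int) 1).map (fun _ => (0 : Int))) with hr
    have hread : PySem.List.pyGetD r.1 (m:Int) 0 = cl.getD m 0 := by
      have := hA m hmL; rwa [if_neg (lt_irrefl m)] at this
    simp only [stepA, hread, halve_adjust]
    refine ⟨by rw [PySem.List.length_pySetD, hl1], by rw [PySem.List.length_pySetD, hl2], ?_, ?_⟩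
    · intro j hj
      have hset1 : m < r.1.length := by rw [hl1]; exact hmL
      rw [PySem.List.pyGetD_pySetD_natCast r.1 m j _ 0 hset1]
      by_cases hjm : j = m
      · rw [if_pos hjm, hjm, if_pos (by omega)]
      · rw [if_neg hjm, hA j hj]
        split_ifs with h1 h2 <;> first | rfl | omega
    · rcases Nat.lt_or_ge (m+1) n with hlt | hge
      · have hmod : PySem.Int.mod ((m:Int)+1) (n:Int) = ((m+1:Nat):Int) := by
          rw [hcast]; exact mod_small _ _ (by exact_mod_cast hn) (by positivity) (by exact_mod_cast hlt)
        rw [hmod]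
        have hold : PySem.List.pyGetD r.2 ((m+1:Nat):Int) 0 = 0 := by
          have := hT (m+1) hlt; rwa [if_neg (by omega), if_neg (by omega)] at this
        rw [hold, zero_add]
        intro j hj
        have hset2 : m + 1 < r.2.length := by rw [hl2]; exact hlt
        rw [PySem.List.pyGetD_pySetD_natCast r.2 (m+1) j _ 0 hset2]
        by_cases hjm : j = m+1
        · rw [if_pos hjm, hjm, if_pos (by omega)]
          norm_num
        · rw [if_neg hjm, hT j hj]
          split_ifs <;> first | rfl | omega
      · have heq : m + 1 = n := by omega
        have hmod : PySem.Int.mod ((m:Int)+1) (n:Int) = ((0:Nat):Int) := by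
          have hmn' : ((m:Int)+1) = (n:Int) := by exact_mod_cast heq
          rw [hmn', mod_self' _ (by exact_mod_cast hn)]; simp
        rw [hmod]
        have hold : PySem.List.pyGetD r.2 ((0:Nat):Int) 0 = 0 := by
          have := hT 0 hn; rwa [if_neg (by omega), if_neg (by omega)] at this
        rw [hold, zero_add]
        intro j hj
        have hset2 : 0 < r.2.length := by rw [hl2]; exact hn
        rw [PySem.List.pyGetD_pySetD_natCast r.2 0 j _ 0 hset2]
        by_cases hj0 : j = 0
        · rw [if_pos hj0, if_neg (by omega), if_pos (by omega)]
          have hmn1 : m = n - 1 := by omega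
          rw [hmn1]
        · rw [if_neg hj0, hT j hj,
              if_pos (by omega : 1 ≤ j ∧ j ≤ m), if_pos (by omega : 1 ≤ j ∧ j ≤ m + 1)]

-- invariant of an overwrite loop 'for i in range(m): xs[i] = g(i, xs[i])' (reads before writes)
lemma loop2_spec (g : Int → Int → Int) (init : List Int) (n : Nat) (hnL : n ≤ init.length) :
    ∀ m : Nat, m ≤ n →
    ((PySem.List.pyRange 0 (m:Int) 1).foldl
        (fun c i => PySem.List.pySetD c i (g i (PySem.List.pyGetD c i 0))) init).length = init.length ∧
    (∀ j : Nat, j < init.length →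
      PySem.List.pyGetD ((PySem.List.pyRange 0 (m:Int) 1).foldl
        (fun c i => PySem.List.pySetD c i (g i (PySem.List.pyGetD c i 0))) init) (j:Int) 0 =
        if j < m then g (j:Int) (PySem.List.pyGetD init (j:Int) 0) else PySem.List.pyGetD init (j:Int) 0) := by
  intro m
  induction m with
  | zero =>
    intro _
    rw [PySem.List.pyRange_one_eq_nil (b := ((0:Nat):Int)) (by norm_num)]
    simp
  | succ m ih =>
    intro hm1
    have hm : m ≤ n := by omega
    have hmL : m < init.length := by omega
    obtain ⟨hl, hG⟩ := ih hm
    have hcast : ((m+1 : Nat) : Int) = (m:Int) + 1 := by push_cast; ring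
    rw [hcast, PySem.List.pyRange_one_succ_right (by exact_mod_cast Nat.zero_le m),
        List.foldl_append, List.foldl_cons, List.foldl_nil]
    set r := (PySem.List.pyRange 0 (m:Int) 1).foldl
        (fun c i => PySem.List.pySetD c i (g i (PySem.List.pyGetD c i 0))) init with hr
    have hread : PySem.List.pyGetD r (m:Int) 0 = PySem.List.pyGetD init (m:Int) 0 := by
      have := hG m hmL; rwa [if_neg (lt_irrefl m)] at this
    have hset : m < r.length := by rw [hl]; exact hmL
    refine ⟨by rw [PySem.List.length_pySetD, hl], ?_⟩
    intro j hj
    rw [hread, PySem.List.pyGetD_pySetD_natCast r m j _ 0 hset]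
    by_cases hjm : j = m
    · rw [if_pos hjm, hjm, if_pos (by omega)]
    · rw [if_neg hjm, hG j hj]
      split_ifs <;> first | rfl | omega

-- invariant of B's single pass after m of n steps: positions < m hold their own half plus the
-- previous position's half (wrapping to n-1 at position 0); prev carries the half of position m-1
lemma loopB_spec (cl : List Int) (n : Nat) (hn : 0 < n) (hnL : n ≤ cl.length) :
    ∀ m : Nat, m ≤ n →
    ((PySem.List.pyRange 0 (m:Int) 1).foldl stepB (cl, halveI (cl.getD (n-1) 0))).1.length = cl.length ∧
    ((PySem.List.pyRange 0 (m:Int) 1).foldl stepB (cl, halveI (cl.getD (n-1) 0))).2 =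
      halveI (cl.getD (if m = 0 then n - 1 else m - 1) 0) ∧
    (∀ j : Nat, j < cl.length →
      PySem.List.pyGetD ((PySem.List.pyRange 0 (m:Int) 1).foldl stepB (cl, halveI (cl.getD (n-1) 0))).1 (j:Int) 0 =
        if j < m then halveI (cl.getD j 0) + halveI (cl.getD (if j = 0 then n - 1 else j - 1) 0)
        else cl.getD j 0) := by
  intro m
  induction m with
  | zero =>
    intro _
    rw [PySem.List.pyRange_one_eq_nil (b := ((0:Nat):Int)) (by norm_num)]
    simp
  | succ m ih =>
    intro hm1
    have hm : m ≤ n := by omega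
    have hmL : m < cl.length := by omega
    obtain ⟨hl, hp, hB⟩ := ih hm
    have hcast : ((m+1 : Nat) : Int) = (m:Int) + 1 := by push_cast; ring
    rw [hcast, PySem.List.pyRange_one_succ_right (by exact_mod_cast Nat.zero_le m),
        List.foldl_append, List.foldl_cons, List.foldl_nil]
    set r := (PySem.List.pyRange 0 (m:Int) 1).foldl stepB (cl, halveI (cl.getD (n-1) 0)) with hr
    have hread : PySem.List.pyGetD r.1 (m:Int) 0 = cl.getD m 0 := by
      have := hB m hmL; rwa [if_neg (lt_irrefl m)] at this
    have hh : PySem.Int.floordiv (PySem.List.pyGetD r.1 (m:Int) 0 + 1) 2 = halveI (cl.getD m 0) := by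
      rw [hread]; rfl
    simp only [stepB, hh, hp]
    have hset : m < r.1.length := by rw [hl]; exact hmL
    refine ⟨by rw [PySem.List.length_pySetD, hl], ?_, ?_⟩
    · rw [if_neg (by omega : ¬ m + 1 = 0)]; norm_num
    · intro j hj
      rw [PySem.List.pyGetD_pySetD_natCast r.1 m j _ 0 hset]
      by_cases hjm : j = m
      · rw [if_pos hjm, hjm, if_pos (Nat.lt_succ_self m)]
      · rw [if_neg hjm, hB j hj]
        split_ifs <;> first | rfl | omega

-- ===== VERDICT (by name: the statement is the Claim_ definition above) =====
theorem teacher_spec : Claim_equal_teacher := by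
  unfold Claim_equal_teacher Spec_teacher Pre_teacher
  intro N cl _dom hpre
  by_cases hN0 : N ≤ 0
  · simp [teacher, teacher_alt, PySem.List.pyRange_one_eq_nil hN0]
  · have hNn : N = ((N.toNat : Nat) : Int) := by omega
    set n := N.toNat with hndef
    have hn0 : 0 < n := by omega
    have hnL : n ≤ cl.length := by omega
    rw [hNn, teacher_eq, teacher_alt_eq]
    obtain ⟨ha1, ha2, hA, hT⟩ := loopA_spec cl n hn0 hnL n le_rfl
    set S := (PySem.List.pyRange 0 ((n:Nat):Int) 1).foldl (stepA ((n:Nat):Int))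
        (cl, (PySem.List.pyRange 0 ((n:Nat):Int) 1).map (fun _ => (0 : Int))) with hS
    -- B's seed prev0 equals halveI (cl.getD (n-1) 0)
    have hseed : (if 0 < ((n:Nat):Int) then
        PySem.Int.floordiv (PySem.List.pyGetD cl (((n:Nat):Int) - 1) 0 + 1) 2 else 0) =
        halveI (cl.getD (n-1) 0) := by
      rw [if_pos (by exact_mod_cast hn0)]
      have hc : ((n:Nat):Int) - 1 = (((n-1:Nat)):Int) := by omega
      rw [hc, PySem.List.pyGetD_natCast]; rfl
    rw [hseed]
    obtain ⟨hb1, _, hB⟩ := loopB_spec cl n hn0 hnL n le_rfl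
    set R := (PySem.List.pyRange 0 ((n:Nat):Int) 1).foldl stepB (cl, halveI (cl.getD (n-1) 0)) with hR
    have h2A := loop2_spec (fun i v => v + PySem.List.pyGetD S.2 i 0) S.1 n
      (by rw [ha1]; exact hnL) n le_rfl
    simp only [] at h2A
    apply listExtPy _ _ (by rw [h2A.1, ha1, hb1])
    intro j hj
    have hjc : j < cl.length := by rwa [h2A.1, ha1] at hj
    rw [h2A.2 j (by rw [ha1]; exact hjc), hB j hjc]
    by_cases hjn : j < n
    · have hA' : PySem.List.pyGetD S.1 (j:Int) 0 = halveI (cl.getD j 0) := by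
        rw [hA j hjc, if_pos hjn]
      rw [if_pos hjn, if_pos hjn, hA']
      by_cases hj0 : j = 0
      · have hT' : PySem.List.pyGetD S.2 (j:Int) 0 = halveI (cl.getD (n-1) 0) := by
          subst hj0; rw [hT 0 hn0, if_neg (by omega), if_pos ⟨rfl, rfl⟩]
        rw [hT', if_pos hj0]
      · have hT' : PySem.List.pyGetD S.2 (j:Int) 0 = halveI (cl.getD (j-1) 0) := by
          rw [hT j hjn, if_pos ⟨by omega, by omega⟩]
        rw [hT', if_neg hj0]
    · have hA' : PySem.List.pyGetD S.1 (j:Int) 0 = cl.getD j 0 := by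
        rw [hA j hjc, if_neg hjn]
      rw [if_neg hjn, if_neg hjn, hA']
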